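-- pv_equiv track=rewrite | github.com/jcstallard/Project_Penny_JEH | src/combined.py | score_ron
-- ===== SOURCE A (Python) =====
-- def score_ron(deck: list[str], player1_choice: list[str], player2_choice: list[str]) -> tuple[int, int]:
--     """
--     This function will score a single deck.
--     Players will win cards in groups of 3 when their chosen sequence appears at the current
--     position. Finally, the player with more cards at the end wins.
--
--     The function will return a tuple of (player1_score, player2_score).
--     """
--
--     # pull up some sort of raw data and partially processed data.
--
--
--     player1_score = 0
--     player2_score = 0
--
--     i = 0
--
--     while i <= len(deck) - 3:
--         grab_cards = deck[i:i+3] # grabs the next 3 cards of the deck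
--
--         if grab_cards == player1_choice:
--             player1_score += 3
--             i += 3
--         elif grab_cards == player2_choice:
--             player2_score += 3
--             i += 3
--         else:
--             i += 1
--
--     return player1_score, player2_score
-- ===== SOURCE B (Python) =====
-- def score_ron(deck: list[str], player1_choice: list[str], player2_choice: list[str]) -> tuple[int, int]:
--     """Suffix dynamic programming, filled back-to-front: dp[i] is the (p1, p2)
--     score of scanning the deck from position i onward (the greedy scan from a
--     position depends only on that position), so the answer is dp[0]."""
--     n = len(deck)
--     dp = [(0, 0)] * (n + 1)
--     for i in range(n - 3, -1, -1):
--         w = deck[i:i+3]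
--         if w == player1_choice:
--             a, b = dp[i + 3]
--             dp[i] = (a + 3, b)
--         elif w == player2_choice:
--             a, b = dp[i + 3]
--             dp[i] = (a, b + 3)
--         else:
--             dp[i] = dp[i + 1]
--     return dp[0]
-- ===== Notes on version B (the rewrite author's own statement) =====
-- stated objective: alternative
-- what changed: Replaces A's forward greedy walk (one moving index, accumulator scores) with a suffix dynamic program: a dp table over all positions is filled back-to-front from the recurrence dp[i] = score of scanning from i, and the answer is dp[0].
import Mathlib
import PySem

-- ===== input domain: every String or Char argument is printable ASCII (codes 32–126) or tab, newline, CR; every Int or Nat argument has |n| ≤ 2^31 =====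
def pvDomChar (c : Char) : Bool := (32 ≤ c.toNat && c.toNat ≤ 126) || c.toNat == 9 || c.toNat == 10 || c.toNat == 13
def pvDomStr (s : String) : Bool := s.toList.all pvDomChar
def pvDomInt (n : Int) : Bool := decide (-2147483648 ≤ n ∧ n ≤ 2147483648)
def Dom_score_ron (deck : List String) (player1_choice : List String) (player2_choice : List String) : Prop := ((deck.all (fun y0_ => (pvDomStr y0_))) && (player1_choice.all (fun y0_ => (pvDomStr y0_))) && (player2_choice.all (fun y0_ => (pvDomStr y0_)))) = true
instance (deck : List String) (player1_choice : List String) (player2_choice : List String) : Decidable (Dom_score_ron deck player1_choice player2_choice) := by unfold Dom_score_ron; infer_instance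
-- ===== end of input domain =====

-- B replaces A's forward greedy walk by a suffix dynamic program filled back-to-front
-- (dp[i] = score of scanning from position i; answer dp[0]); alternative structure, same cost.

-- ===== PORT A =====
-- A's while loop: i ≤ len(deck) - 3 (Int) ⟺ i + 3 ≤ deck.length for Nat i.
def score_ron_loopA (deck player1_choice player2_choice : List String)
    (i : Nat) (s1 s2 : Int) : Int × Int :=
  if _h : i + 3 ≤ deck.length then
    -- grab_cards = deck[i:i+3]
    let grab := PySem.List.slice deck (some (i : Int)) (some ((i : Int) + 3))
    if grab = player1_choice then
      score_ron_loopA deck player1_choice player2_choice (i + 3) (s1 + 3) s2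
    else if grab = player2_choice then
      score_ron_loopA deck player1_choice player2_choice (i + 3) s1 (s2 + 3)
    else
      score_ron_loopA deck player1_choice player2_choice (i + 1) s1 s2
  else (s1, s2)
termination_by deck.length - i

def score_ron (deck : List String) (player1_choice : List String) (player2_choice : List String) : Int × Int :=
  score_ron_loopA deck player1_choice player2_choice 0 0 0

-- ===== PORT B =====
-- body of Source B's for-loop at index i: classify the window and write dp[i]
def score_ron_step (deck p1 p2 : List String) (i : Nat) (dp : List (Int × Int)) : List (Int × Int) :=
  -- w = deck[i:i+3], inlined into the three comparisons
  if PySem.List.slice deck (some (i : Int)) (some ((i : Int) + 3)) = p1 then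
    dp.set i ((dp.getD (i + 3) (0, 0)).1 + 3, (dp.getD (i + 3) (0, 0)).2)
  else if PySem.List.slice deck (some (i : Int)) (some ((i : Int) + 3)) = p2 then
    dp.set i ((dp.getD (i + 3) (0, 0)).1, (dp.getD (i + 3) (0, 0)).2 + 3)
  else
    dp.set i (dp.getD (i + 1) (0, 0))

-- for i in range(n-3, -1, -1): run the body at i, i-1, …, 0 (called only when n ≥ 3)
def score_ron_fill (deck p1 p2 : List String) (i : Nat) (dp : List (Int × Int)) : List (Int × Int) :=
  if _h : i = 0 then score_ron_step deck p1 p2 i dp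
  else score_ron_fill deck p1 p2 (i - 1) (score_ron_step deck p1 p2 i dp)
termination_by i
decreasing_by omega

def score_ron_alt (deck : List String) (player1_choice : List String) (player2_choice : List String) : Int × Int :=
  let n := deck.length
  let dp0 : List (Int × Int) := List.replicate (n + 1) ((0 : Int), (0 : Int))
  let dp := if 3 ≤ n then score_ron_fill deck player1_choice player2_choice (n - 3) dp0 else dp0
  dp.getD 0 (0, 0)

-- ===== PRECONDITION & SPEC =====
def Spec_score_ron (deck : List String) (player1_choice : List String) (player2_choice : List String) (out : Int × Int) : Prop := out = score_ron_alt deck player1_choice player2_choice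
instance (deck : List String) (player1_choice : List String) (player2_choice : List String) (out : Int × Int) : Decidable (Spec_score_ron deck player1_choice player2_choice out) := by unfold Spec_score_ron; infer_instance

-- ===== CLAIM (what is proved, stated in full; the proofs are below) =====
def Claim_equal_score_ron : Prop := ∀ (deck : List String) (player1_choice : List String) (player2_choice : List String), Dom_score_ron deck player1_choice player2_choice → Spec_score_ron deck player1_choice player2_choice (score_ron deck player1_choice player2_choice)

-- ===== LEMMAS AND PROOFS =====

-- g i = A's scan started at position i with zero accumulators (proof-side abbreviation)
def score_ron_g (deck p1 p2 : List String) (i : Nat) : Int × Int :=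
  score_ron_loopA deck p1 p2 i 0 0

theorem score_ron_g_stop (deck p1 p2 : List String) (i : Nat) (h : ¬ i + 3 ≤ deck.length) :
    score_ron_g deck p1 p2 i = (0, 0) := by
  unfold score_ron_g; rw [score_ron_loopA]; simp [h]

-- accumulators just shift the result
theorem score_ron_loopA_shift (deck p1 p2 : List String) :
    ∀ (fuel i : Nat) (s1 s2 : Int), deck.length - i ≤ fuel →
      score_ron_loopA deck p1 p2 i s1 s2 =
        (s1 + (score_ron_g deck p1 p2 i).1, s2 + (score_ron_g deck p1 p2 i).2) := by
  intro fuel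
  induction fuel with
  | zero =>
    intro i s1 s2 hf
    have h : ¬ i + 3 ≤ deck.length := by omega
    rw [score_ron_g_stop _ _ _ _ h, score_ron_loopA]
    simp [h]
  | succ fuel ih =>
    intro i s1 s2 hf
    by_cases h : i + 3 ≤ deck.length
    · rw [score_ron_loopA]
      conv_rhs => unfold score_ron_g; rw [score_ron_loopA]
      simp only [h, dif_pos]
      by_cases h1 : PySem.List.slice deck (some (i : Int)) (some ((i : Int) + 3)) = p1
      · simp only [if_pos h1]
        rw [ih (i + 3) (s1 + 3) s2 (by omega), ih (i + 3) (0 + 3) 0 (by omega)]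
        simp [score_ron_g]; try omega
      · simp only [if_neg h1]
        by_cases h2 : PySem.List.slice deck (some (i : Int)) (some ((i : Int) + 3)) = p2
        · simp only [if_pos h2]
          rw [ih (i + 3) s1 (s2 + 3) (by omega), ih (i + 3) 0 (0 + 3) (by omega)]
          simp [score_ron_g]; try omega
        · simp only [if_neg h2]
          rw [ih (i + 1) s1 s2 (by omega), ih (i + 1) 0 0 (by omega)]
          simp [score_ron_g]; try omega
    · rw [score_ron_g_stop _ _ _ _ h, score_ron_loopA]
      simp [h]

-- the recurrence the dp table is filled from (mirrors score_ron_step's three branches)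
theorem score_ron_g_rec (deck p1 p2 : List String) (i : Nat) (h : i + 3 ≤ deck.length) :
    score_ron_g deck p1 p2 i =
      (let w := PySem.List.slice deck (some (i : Int)) (some ((i : Int) + 3))
       if w = p1 then
         ((score_ron_g deck p1 p2 (i + 3)).1 + 3, (score_ron_g deck p1 p2 (i + 3)).2)
       else if w = p2 then
         ((score_ron_g deck p1 p2 (i + 3)).1, (score_ron_g deck p1 p2 (i + 3)).2 + 3)
       else score_ron_g deck p1 p2 (i + 1)) := by
  conv_lhs => unfold score_ron_g; rw [score_ron_loopA]
  simp only [h, dif_pos]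
  by_cases h1 : PySem.List.slice deck (some (i : Int)) (some ((i : Int) + 3)) = p1
  · simp only [if_pos h1]
    rw [score_ron_loopA_shift deck p1 p2 deck.length (i + 3) (0 + 3) 0 (by omega)]
    simp; ring
  · simp only [if_neg h1]
    by_cases h2 : PySem.List.slice deck (some (i : Int)) (some ((i : Int) + 3)) = p2
    · simp only [if_pos h2]
      rw [score_ron_loopA_shift deck p1 p2 deck.length (i + 3) 0 (0 + 3) (by omega)]
      simp; ring
    · simp only [if_neg h2]
      rfl

theorem getD_set_self (l : List (Int × Int)) (i : Nat) (v : Int × Int) (hi : i < l.length) :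
    (l.set i v).getD i (0, 0) = v := by
  simp [List.getD_eq_getElem?_getD, hi]

theorem getD_set_ne (l : List (Int × Int)) (i k : Nat) (v : Int × Int) (hk : i ≠ k) :
    (l.set i v).getD k (0, 0) = l.getD k (0, 0) := by
  simp [List.getD_eq_getElem?_getD, List.getElem?_set_ne hk]

-- one loop-body execution makes dp correct at i and preserves it above i
theorem score_ron_step_correct (deck p1 p2 : List String) (i : Nat) (dp : List (Int × Int))
    (hlen : dp.length = deck.length + 1) (hi : i + 3 ≤ deck.length)
    (hup : ∀ k, i < k → dp.getD k (0, 0) = score_ron_g deck p1 p2 k) :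
    ∀ k, i ≤ k →
      (score_ron_step deck p1 p2 i dp).getD k (0, 0) = score_ron_g deck p1 p2 k := by
  intro k hk
  unfold score_ron_step
  rcases eq_or_lt_of_le hk with heq | hlt
  · subst heq
    rw [score_ron_g_rec deck p1 p2 i hi]
    have hilen : i < dp.length := by omega
    by_cases h1 : PySem.List.slice deck (some (i : Int)) (some ((i : Int) + 3)) = p1
    · simp only [if_pos h1, getD_set_self _ _ _ hilen, hup (i + 3) (by omega)]
    · by_cases h2 : PySem.List.slice deck (some (i : Int)) (some ((i : Int) + 3)) = p2
      · simp only [if_neg h1, if_pos h2, getD_set_self _ _ _ hilen, hup (i + 3) (by omega)]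
      · simp only [if_neg h1, if_neg h2, getD_set_self _ _ _ hilen, hup (i + 1) (by omega)]
  · have hne : i ≠ k := by omega
    split_ifs <;> rw [getD_set_ne _ _ _ _ hne] <;> exact hup k hlt

theorem score_ron_step_len (deck p1 p2 : List String) (i : Nat) (dp : List (Int × Int)) :
    (score_ron_step deck p1 p2 i dp).length = dp.length := by
  unfold score_ron_step; split_ifs <;> simp

-- filling from m down to 0 makes dp correct everywhere
theorem score_ron_fill_correct (deck p1 p2 : List String) :
    ∀ (m : Nat) (dp : List (Int × Int)), dp.length = deck.length + 1 →
      m + 3 ≤ deck.length →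
      (∀ k, m < k → dp.getD k (0, 0) = score_ron_g deck p1 p2 k) →
      ∀ k, (score_ron_fill deck p1 p2 m dp).getD k (0, 0) = score_ron_g deck p1 p2 k := by
  intro m
  induction m with
  | zero =>
    intro dp hlen hm hup k
    rw [score_ron_fill]; simp only []
    rcases Nat.eq_zero_or_pos k with rfl | hk
    · exact score_ron_step_correct deck p1 p2 0 dp hlen hm hup 0 (le_refl 0)
    · exact score_ron_step_correct deck p1 p2 0 dp hlen hm hup k (by omega)
  | succ m ih =>
    intro dp hlen hm hup k
    rw [score_ron_fill]
    simp only [Nat.succ_ne_zero, Nat.add_sub_cancel]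
    apply ih
    · rw [score_ron_step_len]; exact hlen
    · omega
    · intro k' hk'
      exact score_ron_step_correct deck p1 p2 (m + 1) dp hlen hm hup k' (by omega)

-- ===== VERDICT (by name: the statement is the Claim_ definition above) =====
theorem score_ron_spec : Claim_equal_score_ron := by
  intro deck p1 p2 _
  unfold Spec_score_ron score_ron score_ron_alt
  by_cases h3 : 3 ≤ deck.length
  · simp only [if_pos h3]
    exact (score_ron_fill_correct deck p1 p2 (deck.length - 3)
      (List.replicate (deck.length + 1) ((0 : Int), (0 : Int))) (by simp) (by omega)
      (fun k hk => by
        rw [score_ron_g_stop deck p1 p2 k (by omega)]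
        simp [List.getD_eq_getElem?_getD, List.getElem?_replicate]
        split_ifs <;> rfl) 0).symm
  · simp only [if_neg h3]
    rw [score_ron_loopA]
    have : ¬ 0 + 3 ≤ deck.length := by omega
    simp [this, List.getD_eq_getElem?_getD]
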